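-- pv_equiv track=rewrite | github.com/AshIsbitt/AdventOfCode2020 | day9.py | validityChecker
-- ===== SOURCE A (Python) =====
-- def validityChecker(currentVal: int, prevVals: list[int]) -> bool:
--     ret: bool = False
--
--     for item in prevVals[-25:]:
--         buf = currentVal - item
--         if buf in prevVals[-25:] and buf != item:
--             ret = True
--             break
--
--     return ret
-- ===== SOURCE B (Python) =====
-- def validityChecker(currentVal: int, prevVals: list[int]) -> bool:
--     arr = sorted(prevVals[-25:])
--     left, right = 0, len(arr) - 1
--     while left < right:
--         s = arr[left] + arr[right]
--         if s < currentVal: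
--             left += 1
--         elif s > currentVal:
--             right -= 1
--         elif arr[left] != arr[right]:
--             return True
--         else:
--             left += 1
--     return False
-- ===== Notes on version B (the rewrite author's own statement) =====
-- stated objective: alternative
-- what changed: Replaces the nested membership scan over the last-25 window with sort-then-two-pointer two-sum (skipping equal-valued endpoint pairs to keep the distinct-values requirement); the window is capped at 25, so running time is unchanged.
import Mathlib
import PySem

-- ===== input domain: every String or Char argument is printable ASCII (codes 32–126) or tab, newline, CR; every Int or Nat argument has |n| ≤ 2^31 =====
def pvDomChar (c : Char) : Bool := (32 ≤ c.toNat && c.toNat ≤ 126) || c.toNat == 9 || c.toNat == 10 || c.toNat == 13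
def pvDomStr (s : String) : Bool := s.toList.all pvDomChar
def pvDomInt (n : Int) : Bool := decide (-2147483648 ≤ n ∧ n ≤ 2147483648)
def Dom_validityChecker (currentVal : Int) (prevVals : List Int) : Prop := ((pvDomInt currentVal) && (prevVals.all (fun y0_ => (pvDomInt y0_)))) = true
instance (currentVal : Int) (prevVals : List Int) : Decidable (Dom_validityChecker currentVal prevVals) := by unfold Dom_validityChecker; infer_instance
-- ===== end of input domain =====

-- B replaces A's nested membership scan over the last-25 window with sort + two-pointer two-sum over the sorted window (objective: alternative; the window is capped at 25, so no speed is claimed).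

-- ===== PORT A =====
-- the for-loop of A with its early break: first item whose complement is in the window (and differs) yields True
def pvLoopA (currentVal : Int) (w25 : List Int) : List Int → Bool
  | [] => false
  | item :: rest =>
    let buf := currentVal - item
    if buf ∈ w25 ∧ buf ≠ item then true else pvLoopA currentVal w25 rest

def validityChecker (currentVal : Int) (prevVals : List Int) : Bool :=
  pvLoopA currentVal (PySem.List.slice prevVals (some (-25)) none)
    (PySem.List.slice prevVals (some (-25)) none)

-- ===== PORT B =====
-- the while-loop of B: converging two-pointer sweep over the sorted window
def pvTwoPtr (currentVal : Int) (arr : List Int) (left right : Nat) : Bool :=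
  if _h : left < right then
    let s := arr.getD left 0 + arr.getD right 0
    if s < currentVal then pvTwoPtr currentVal arr (left + 1) right
    else if currentVal < s then pvTwoPtr currentVal arr left (right - 1)
    else if arr.getD left 0 ≠ arr.getD right 0 then true
    else pvTwoPtr currentVal arr (left + 1) right
  else false
termination_by right - left

def validityChecker_alt (currentVal : Int) (prevVals : List Int) : Bool :=
  let arr := PySem.List.sorted (PySem.List.slice prevVals (some (-25)) none) (fun x => x) false
  pvTwoPtr currentVal arr 0 (arr.length - 1)

-- ===== PRECONDITION & SPEC =====
def Spec_validityChecker (currentVal : Int) (prevVals : List Int) (out : Bool) : Prop := out = validityChecker_alt currentVal prevVals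
instance (currentVal : Int) (prevVals : List Int) (out : Bool) : Decidable (Spec_validityChecker currentVal prevVals out) := by unfold Spec_validityChecker; infer_instance

-- ===== CLAIM (what is proved, stated in full; the proofs are below) =====
def Claim_equal_validityChecker : Prop := ∀ (currentVal : Int) (prevVals : List Int), Dom_validityChecker currentVal prevVals → Spec_validityChecker currentVal prevVals (validityChecker currentVal prevVals)

-- ===== LEMMAS AND PROOFS =====

-- A's loop returns true iff some item of the (remaining) list has its complement in the window
theorem pvLoopA_iff (currentVal : Int) (w25 : List Int) (l : List Int) :
    pvLoopA currentVal w25 l = true ↔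
      ∃ item ∈ l, (currentVal - item) ∈ w25 ∧ currentVal - item ≠ item := by
  induction l with
  | nil => simp [pvLoopA]
  | cons x xs ih =>
    simp only [pvLoopA]
    by_cases h : (currentVal - x) ∈ w25 ∧ currentVal - x ≠ x
    · simp [h]
    · simp only [if_neg h, ih, List.mem_cons]
      constructor
      · rintro ⟨i, hi, hp⟩; exact ⟨i, Or.inr hi, hp⟩
      · rintro ⟨i, hi | hi, hp⟩
        · exact absurd (hi ▸ hp) h
        · exact ⟨i, hi, hp⟩

-- a pair of positions i < j within [l, r] whose values sum to the target and differ
def HasPair (currentVal : Int) (arr : List Int) (l r : Nat) : Prop :=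
  ∃ i j : Nat, l ≤ i ∧ i < j ∧ j ≤ r ∧
    arr.getD i 0 + arr.getD j 0 = currentVal ∧ arr.getD i 0 ≠ arr.getD j 0

theorem getD_mono (arr : List Int) (hs : arr.Pairwise (· ≤ ·)) {i j : Nat}
    (hij : i ≤ j) (hj : j < arr.length) : arr.getD i 0 ≤ arr.getD j 0 := by
  rcases Nat.lt_or_ge i j with h | h
  · rw [List.getD_eq_getElem _ _ (lt_trans h hj), List.getD_eq_getElem _ _ hj]
    exact (List.pairwise_iff_getElem.mp hs) i j _ hj h
  · have : i = j := le_antisymm hij h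
    subst this; exact le_rfl

theorem pvTwoPtr_iff (currentVal : Int) (arr : List Int)
    (hs : arr.Pairwise (· ≤ ·)) (l r : Nat) :
    r < arr.length →
      (pvTwoPtr currentVal arr l r = true ↔ HasPair currentVal arr l r) := by
  induction l, r using pvTwoPtr.induct currentVal arr with
  | case1 l r h s hlt ih =>
    intro hr
    rw [pvTwoPtr, dif_pos h, if_pos hlt]
    rw [ih hr]
    constructor
    · rintro ⟨i, j, hli, hij, hjr, hsum, hne⟩
      exact ⟨i, j, le_trans (Nat.le_succ l) hli, hij, hjr, hsum, hne⟩
    · rintro ⟨i, j, hli, hij, hjr, hsum, hne⟩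
      refine ⟨i, j, ?_, hij, hjr, hsum, hne⟩
      rcases Nat.lt_or_ge l i with h' | h'
      · omega
      · -- i = l: the sum is at most arr[l] + arr[r] < currentVal, contradiction
        have hil : i = l := le_antisymm h' hli
        have h1 : arr.getD j 0 ≤ arr.getD r 0 := getD_mono arr hs hjr hr
        have h2 : arr.getD i 0 + arr.getD j 0 < currentVal := by
          rw [hil]; omega
        omega
  | case2 l r h s hlt hgt ih =>
    intro hr
    rw [pvTwoPtr, dif_pos h, if_neg hlt, if_pos hgt]
    rw [ih (by omega)]
    constructor
    · rintro ⟨i, j, hli, hij, hjr, hsum, hne⟩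
      exact ⟨i, j, hli, hij, by omega, hsum, hne⟩
    · rintro ⟨i, j, hli, hij, hjr, hsum, hne⟩
      refine ⟨i, j, hli, hij, ?_, hsum, hne⟩
      rcases Nat.lt_or_ge j r with h' | h'
      · omega
      · -- j = r: the sum is at least arr[l] + arr[r] > currentVal, contradiction
        have hjr' : j = r := le_antisymm hjr h'
        have h1 : arr.getD l 0 ≤ arr.getD i 0 := getD_mono arr hs hli (by omega)
        have h2 : currentVal < arr.getD i 0 + arr.getD j 0 := by
          rw [hjr']; omega
        omega
  | case3 l r h s hlt hgt hne =>
    intro hr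
    rw [pvTwoPtr, dif_pos h, if_neg hlt, if_neg hgt, if_pos hne]
    simp only [true_iff]
    exact ⟨l, r, le_rfl, h, le_rfl, by omega, hne⟩
  | case4 l r h s hlt hgt heq ih =>
    intro hr
    rw [pvTwoPtr, dif_pos h, if_neg hlt, if_neg hgt, if_neg heq]
    rw [ih hr]
    -- all values in [l, r] are equal here, so neither side has a distinct pair
    have heq' : arr.getD l 0 = arr.getD r 0 := by
      by_contra hc; exact heq hc
    have hall : ∀ k, l ≤ k → k ≤ r → arr.getD k 0 = arr.getD l 0 := by
      intro k hlk hkr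
      have h1 : arr.getD l 0 ≤ arr.getD k 0 := getD_mono arr hs hlk (by omega)
      have h2 : arr.getD k 0 ≤ arr.getD r 0 := getD_mono arr hs hkr hr
      omega
    constructor
    · rintro ⟨i, j, hli, hij, hjr, hsum, hne⟩
      exact ⟨i, j, le_trans (Nat.le_succ l) hli, hij, hjr, hsum, hne⟩
    · rintro ⟨i, j, hli, hij, hjr, hsum, hne⟩
      exfalso
      have := hall i hli (by omega)
      have := hall j (by omega) hjr
      omega
  | case5 l r h =>
    intro _
    rw [pvTwoPtr, dif_neg h]
    simp only [Bool.false_eq_true, false_iff]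
    rintro ⟨i, j, hli, hij, hjr, _, _⟩
    omega

-- HasPair over the whole sorted list ↔ an unordered distinct-value pair by membership
theorem hasPair_iff_mem (currentVal : Int) (arr : List Int) (hne : arr ≠ []) :
    HasPair currentVal arr 0 (arr.length - 1) ↔
      ∃ x ∈ arr, ∃ y ∈ arr, x + y = currentVal ∧ x ≠ y := by
  have hlen : 0 < arr.length := List.length_pos_iff.mpr hne
  constructor
  · rintro ⟨i, j, _, hij, hjr, hsum, hne2⟩
    have hj : j < arr.length := by omega
    have hi : i < arr.length := by omega
    rw [List.getD_eq_getElem _ _ hi, List.getD_eq_getElem _ _ hj] at hsum hne2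
    exact ⟨arr[i], List.getElem_mem hi, arr[j], List.getElem_mem hj, hsum, hne2⟩
  · rintro ⟨x, hx, y, hy, hsum, hxy⟩
    obtain ⟨i, hi, hxi⟩ := List.mem_iff_getElem.mp hx
    obtain ⟨j, hj, hyj⟩ := List.mem_iff_getElem.mp hy
    have hij : i ≠ j := by
      intro hc; apply hxy
      subst hc
      rw [← hxi, ← hyj]
    rcases Nat.lt_or_ge i j with h | h
    · exact ⟨i, j, Nat.zero_le _, h, by omega,
        by rw [List.getD_eq_getElem _ _ hi, List.getD_eq_getElem _ _ hj, hxi, hyj]; exact hsum,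
        by rw [List.getD_eq_getElem _ _ hi, List.getD_eq_getElem _ _ hj, hxi, hyj]; exact hxy⟩
    · have h' : j < i := by omega
      exact ⟨j, i, Nat.zero_le _, h', by omega,
        by rw [List.getD_eq_getElem _ _ hj, List.getD_eq_getElem _ _ hi, hxi, hyj]; omega,
        by rw [List.getD_eq_getElem _ _ hj, List.getD_eq_getElem _ _ hi, hxi, hyj]; exact hxy.symm⟩

-- A's existence condition rephrased as an unordered distinct-value pair
theorem aPred_iff_pair (currentVal : Int) (w25 : List Int) :
    (∃ item ∈ w25, (currentVal - item) ∈ w25 ∧ currentVal - item ≠ item) ↔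
      ∃ x ∈ w25, ∃ y ∈ w25, x + y = currentVal ∧ x ≠ y := by
  constructor
  · rintro ⟨item, hi, hb, hne⟩
    exact ⟨item, hi, currentVal - item, hb, by omega, fun hc => hne hc.symm⟩
  · rintro ⟨x, hx, y, hy, hsum, hxy⟩
    refine ⟨x, hx, ?_, ?_⟩
    · have : currentVal - x = y := by omega
      rw [this]; exact hy
    · have : currentVal - x = y := by omega
      rw [this]; exact fun hc => hxy hc.symm

-- ===== VERDICT (by name: the statement is the Claim_ definition above) =====
theorem validityChecker_spec : Claim_equal_validityChecker := by
  intro currentVal prevVals _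
  unfold Spec_validityChecker validityChecker validityChecker_alt
  set w25 := PySem.List.slice prevVals (some (-25)) none with hw
  set arr := PySem.List.sorted w25 (fun x => x) false with ha
  have hperm : arr.Perm w25 := PySem.List.sorted_perm w25 (fun x => x) false
  have hs : arr.Pairwise (· ≤ ·) := PySem.List.sorted_pairwise w25 (fun x => x)
  rcases eq_or_ne arr ([] : List Int) with hnil | hnil
  · have hw25 : w25 = [] := by
      have := hperm.length_eq
      rw [hnil] at this
      exact List.length_eq_zero_iff.mp this.symm
    rw [hw25, hnil]
    simp [pvLoopA, pvTwoPtr]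
  · have hlen : 0 < arr.length := List.length_pos_iff.mpr hnil
    have h1 := pvLoopA_iff currentVal w25 w25
    have h2 := pvTwoPtr_iff currentVal arr hs 0 (arr.length - 1) (by omega)
    have h3 := hasPair_iff_mem currentVal arr hnil
    have hmem : ∀ x : Int, x ∈ arr ↔ x ∈ w25 := fun x => hperm.mem_iff
    rw [Bool.eq_iff_iff, h1, h2, h3, aPred_iff_pair]
    simp only [hmem]
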